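-- pv_equiv track=rewrite | github.com/p2k3m/Vertica-Database | scripts/auto_pipeline_fix.py | _extract_relevant_log_tail
-- ===== SOURCE A (Python) =====
-- def _extract_relevant_log_tail(text: str, max_lines: int = 120) -> str:
--     lines = text.strip().splitlines()
--     if not lines:
--         return ""
--     failure_markers = [
--         "error",
--         "fail",
--         "exception",
--         "traceback",
--         "could not",
--     ]
--     lower_lines = [line.lower() for line in lines]
--     indices = [i for i, line in enumerate(lower_lines) if any(k in line for k in failure_markers)]
--     if indices:
--         start = max(0, indices[-1] - max_lines // 2)
--     else:
--         start = max(0, len(lines) - max_lines)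
--     excerpt = lines[start : start + max_lines]
--     return "\n".join(excerpt)
-- ===== SOURCE B (Python) =====
-- def _extract_relevant_log_tail(text: str, max_lines: int = 120) -> str:
--     lines = text.strip().splitlines()
--     if not lines:
--         return ""
--     markers = ("error", "fail", "exception", "traceback", "could not")
--     last = -1
--     for j, line in enumerate(reversed(lines)):
--         low = line.lower()
--         if any(m in low for m in markers):
--             last = len(lines) - 1 - j
--             break
--     if last >= 0:
--         start = max(0, last - max_lines // 2)
--     else:
--         start = max(0, len(lines) - max_lines)
--     return "\n".join(lines[start : start + max_lines])
-- ===== Notes on version B (the rewrite author's own statement) =====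
-- stated objective: simpler
-- what changed: B replaces A's full pass that builds the list of all matching indices (after pre-lowering every line) with a backward scan over reversed(lines) that lowers lazily and stops at the first (i.e. last) failure marker; the offset/slice math is unchanged.
import Mathlib
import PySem

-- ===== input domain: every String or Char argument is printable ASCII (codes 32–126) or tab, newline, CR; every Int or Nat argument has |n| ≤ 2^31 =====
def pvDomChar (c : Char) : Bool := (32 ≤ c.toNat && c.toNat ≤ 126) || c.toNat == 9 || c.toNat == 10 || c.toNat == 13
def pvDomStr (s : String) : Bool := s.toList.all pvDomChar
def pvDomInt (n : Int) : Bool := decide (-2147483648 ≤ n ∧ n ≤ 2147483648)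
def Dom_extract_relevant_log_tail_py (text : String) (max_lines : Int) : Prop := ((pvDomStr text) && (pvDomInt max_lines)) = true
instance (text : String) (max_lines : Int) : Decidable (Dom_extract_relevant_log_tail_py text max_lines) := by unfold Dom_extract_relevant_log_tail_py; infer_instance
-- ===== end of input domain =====

-- B simplifies A: instead of building the list of all failure-marker indices over pre-lowered
-- lines, B scans the reversed line list and stops at the first (= last) marker hit; same slice math.

-- ===== PORT A =====
def pvMarkers : List String := ["error", "fail", "exception", "traceback", "could not"]

def extract_relevant_log_tail_py (text : String) (max_lines : Int) : String :=
  let lines := PySem.Str.splitlines (PySem.Str.strip text)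
  if lines = [] then ""
  else
    let lower_lines := lines.map PySem.Str.lower
    let indices := (PySem.List.enumerate lower_lines 0).filterMap
      (fun p => if pvMarkers.any (fun k => PySem.Str.isIn k p.2) then some p.1 else none)
    let start : Int :=
      match indices.getLast? with          -- `if indices: … indices[-1] …`
      | some i => max 0 (i - PySem.Int.floordiv max_lines 2)
      | none   => max 0 ((lines.length : Int) - max_lines)
    PySem.Str.join "\n" (PySem.List.slice lines (some start) (some (start + max_lines)))

-- ===== PORT B =====
-- the `for j, line in enumerate(reversed(lines)): … break` loop of Source B
def pvScanBack (n : Int) : List (Int × String) → Int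
  | [] => -1
  | (j, line) :: rest =>
      if pvMarkers.any (fun m => PySem.Str.isIn m (PySem.Str.lower line)) then n - 1 - j
      else pvScanBack n rest

def extract_relevant_log_tail_py_alt (text : String) (max_lines : Int) : String :=
  let lines := PySem.Str.splitlines (PySem.Str.strip text)
  if lines = [] then ""
  else
    let last := pvScanBack (lines.length : Int) (PySem.List.enumerate lines.reverse 0)
    let start : Int :=
      if 0 ≤ last then max 0 (last - PySem.Int.floordiv max_lines 2)
      else max 0 ((lines.length : Int) - max_lines)
    PySem.Str.join "\n" (PySem.List.slice lines (some start) (some (start + max_lines)))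

-- ===== PRECONDITION & SPEC =====
def Spec_extract_relevant_log_tail_py (text : String) (max_lines : Int) (out : String) : Prop := out = extract_relevant_log_tail_py_alt text max_lines
instance (text : String) (max_lines : Int) (out : String) : Decidable (Spec_extract_relevant_log_tail_py text max_lines out) := by unfold Spec_extract_relevant_log_tail_py; infer_instance

-- ===== CLAIM (what is proved, stated in full; the proofs are below) =====
def Claim_equal_extract_relevant_log_tail_py : Prop := ∀ (text : String) (max_lines : Int), Dom_extract_relevant_log_tail_py text max_lines → Spec_extract_relevant_log_tail_py text max_lines (extract_relevant_log_tail_py text max_lines)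

-- ===== LEMMAS AND PROOFS =====

-- A's per-line failure test, shared shape of both ports
def pvHit (line : String) : Bool := pvMarkers.any (fun k => PySem.Str.isIn k (PySem.Str.lower line))

-- A's index list for a given line list
def pvIdxs (l : List String) : List Int :=
  (PySem.List.enumerate (l.map PySem.Str.lower) 0).filterMap
    (fun p => if pvMarkers.any (fun k => PySem.Str.isIn k p.2) then some p.1 else none)

theorem pvScanBack_shift (r : List (Int × String)) (n : Int) :
    pvScanBack n (r.map (fun p => (p.1 + 1, p.2))) = pvScanBack (n - 1) r := by
  induction r with
  | nil => rfl
  | cons p rest ih =>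
    obtain ⟨j, line⟩ := p
    simp [pvScanBack, ih]
    split_ifs <;> omega

theorem pvEnumerate_shift {α : Type} (r : List α) (s : Int) :
    PySem.List.enumerate r (s + 1) = (PySem.List.enumerate r s).map (fun p => (p.1 + 1, p.2)) := by
  induction r generalizing s with
  | nil => simp [PySem.List.enumerate_nil]
  | cons x rest ih => simp [PySem.List.enumerate_cons, ih]

theorem pvIdxs_snoc (l : List String) (x : String) :
    pvIdxs (l ++ [x]) = pvIdxs l ++ (if pvHit x then [(l.length : Int)] else []) := by
  unfold pvIdxs pvHit
  rw [List.map_append, PySem.List.enumerate_append, List.filterMap_append]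
  simp [PySem.List.enumerate_cons, PySem.List.enumerate_nil]
  split_ifs with hh <;> simp_all

theorem pvIdxs_nonneg (l : List String) : ∀ i ∈ pvIdxs l, 0 ≤ i := by
  induction l using List.reverseRecOn with
  | nil => intro i hi; simp [pvIdxs, PySem.List.enumerate_nil] at hi
  | append_singleton l' x ih =>
    intro i hi
    rw [pvIdxs_snoc] at hi
    rcases List.mem_append.mp hi with h1 | h2
    · exact ih i h1
    · split_ifs at h2 <;> simp_all

-- main bridge: B's backward scan computes A's last matching index (or -1)
theorem pvScan_eq_last (l : List String) :
    pvScanBack (l.length : Int) (PySem.List.enumerate l.reverse 0) =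
      (match (pvIdxs l).getLast? with | some i => i | none => -1) := by
  induction l using List.reverseRecOn with
  | nil => simp [pvIdxs, PySem.List.enumerate_nil, pvScanBack]
  | append_singleton l' x ih =>
    have hrev : (l' ++ [x]).reverse = x :: l'.reverse := by simp
    have hlen : ((l' ++ [x]).length : Int) = (l'.length : Int) + 1 := by simp
    rw [hrev, hlen, PySem.List.enumerate_cons, pvIdxs_snoc]
    show (if pvHit x = true then (l'.length : Int) + 1 - 1 - 0
          else pvScanBack ((l'.length : Int) + 1) (PySem.List.enumerate l'.reverse (0 + 1))) = _
    by_cases hx : pvHit x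
    · simp [hx]
    · simp only [hx, Bool.false_eq_true, if_false]
      rw [pvEnumerate_shift l'.reverse 0, pvScanBack_shift]
      simpa using ih

-- ===== VERDICT (by name: the statement is the Claim_ definition above) =====
theorem extract_relevant_log_tail_py_spec : Claim_equal_extract_relevant_log_tail_py := by
  intro text max_lines _hdom
  unfold Spec_extract_relevant_log_tail_py extract_relevant_log_tail_py extract_relevant_log_tail_py_alt
  set lines := PySem.Str.splitlines (PySem.Str.strip text)
  by_cases h : lines = []
  · rw [if_pos h, if_pos h]
  · rw [if_neg h, if_neg h]
    have hscan := pvScan_eq_last lines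
    have hidx : (PySem.List.enumerate (lines.map PySem.Str.lower) 0).filterMap
        (fun p => if pvMarkers.any (fun k => PySem.Str.isIn k p.2) then some p.1 else none)
        = pvIdxs lines := rfl
    simp only [hidx, hscan]
    cases hcase : (pvIdxs lines).getLast? with
    | none => rw [if_neg (by norm_num : ¬ (0:Int) ≤ -1)]
    | some i =>
      have hi : 0 ≤ i := pvIdxs_nonneg lines i (List.mem_of_getLast? hcase)
      rw [if_pos hi]
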